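-- pv_equiv track=rewrite | github.com/iquasere/UPIMAPI | upimapi.py | extract_lineage_columns
-- ===== SOURCE A (Python) =====
-- def extract_lineage_columns(columns):
--     tax_cols, taxids_cols = [], []
--     if columns is not None:
--         tax_cols = [col for col in columns if ('Taxonomic lineage (' in col and col != 'Taxonomic lineage (Ids)')]
--         taxids_cols = [col for col in columns if ('Taxonomic lineage IDs (' in col)]
--         columns = [col for col in columns if col not in tax_cols + taxids_cols]
--         if len(tax_cols) > 0:
--             columns.append('Taxonomic lineage')
--         if len(taxids_cols) > 0:
--             columns.append('Taxonomic lineage (Ids)')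
--     return columns, tax_cols, taxids_cols, tax_cols + taxids_cols
-- ===== SOURCE B (Python) =====
-- def extract_lineage_columns(columns):
--     if columns is None:
--         return None, [], [], []
--     tax_cols, taxids_cols, rest = [], [], []
--     for col in columns:
--         is_tax = 'Taxonomic lineage (' in col and col != 'Taxonomic lineage (Ids)'
--         is_ids = 'Taxonomic lineage IDs (' in col
--         if is_tax:
--             tax_cols.append(col)
--         if is_ids:
--             taxids_cols.append(col)
--         if not is_tax and not is_ids:
--             rest.append(col)
--     if tax_cols:
--         rest.append('Taxonomic lineage')
--     if taxids_cols:
--         rest.append('Taxonomic lineage (Ids)')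
--     return rest, tax_cols, taxids_cols, tax_cols + taxids_cols
-- ===== Notes on version B (the rewrite author's own statement) =====
-- stated objective: simpler
-- what changed: Replaces A's three list comprehensions plus a quadratic membership re-scan (col not in tax_cols+taxids_cols) with one pass over columns that partitions each column into tax_cols, taxids_cols or rest using the two conditions directly.
import Mathlib
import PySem

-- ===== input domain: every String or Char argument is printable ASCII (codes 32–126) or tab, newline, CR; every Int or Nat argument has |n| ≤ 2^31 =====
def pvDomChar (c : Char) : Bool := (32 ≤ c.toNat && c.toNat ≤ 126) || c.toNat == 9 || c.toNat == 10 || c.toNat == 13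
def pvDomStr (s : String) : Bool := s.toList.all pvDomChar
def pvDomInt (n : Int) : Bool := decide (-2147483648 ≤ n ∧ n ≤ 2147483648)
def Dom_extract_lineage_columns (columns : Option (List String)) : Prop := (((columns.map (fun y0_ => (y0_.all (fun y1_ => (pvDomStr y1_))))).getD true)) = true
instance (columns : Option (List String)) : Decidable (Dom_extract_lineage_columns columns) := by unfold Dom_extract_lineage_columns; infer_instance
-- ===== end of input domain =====

-- B: one-pass partition instead of three comprehensions + membership re-scan (objective: simpler).
-- ===== PORT A =====
def extract_lineage_columns (columns : Option (List String)) : Option (List String) × List String × List String × List String :=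
  match columns with
  | none => (none, [], [], [] ++ [])
  | some cols =>
    let tax_cols := cols.filter (fun col => PySem.Str.isIn "Taxonomic lineage (" col && !(col == "Taxonomic lineage (Ids)"))
    let taxids_cols := cols.filter (fun col => PySem.Str.isIn "Taxonomic lineage IDs (" col)
    let cols1 := cols.filter (fun col => !((tax_cols ++ taxids_cols).contains col))
    let cols2 := if tax_cols.length > 0 then cols1 ++ ["Taxonomic lineage"] else cols1
    let cols3 := if taxids_cols.length > 0 then cols2 ++ ["Taxonomic lineage (Ids)"] else cols2
    (some cols3, tax_cols, taxids_cols, tax_cols ++ taxids_cols)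

-- ===== PORT B =====
def pvStep (acc : List String × List String × List String) (col : String) :
    List String × List String × List String :=
  let is_tax := PySem.Str.isIn "Taxonomic lineage (" col && !(col == "Taxonomic lineage (Ids)")
  let is_ids := PySem.Str.isIn "Taxonomic lineage IDs (" col
  (if !is_tax && !is_ids then acc.1 ++ [col] else acc.1,
   if is_tax then acc.2.1 ++ [col] else acc.2.1,
   if is_ids then acc.2.2 ++ [col] else acc.2.2)

def extract_lineage_columns_alt (columns : Option (List String)) : Option (List String) × List String × List String × List String :=
  match columns with
  | none => (none, [], [], [])
  | some cols =>
    let r := cols.foldl pvStep ([], [], [])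
    let rest1 := if !r.2.1.isEmpty then r.1 ++ ["Taxonomic lineage"] else r.1
    let rest2 := if !r.2.2.isEmpty then rest1 ++ ["Taxonomic lineage (Ids)"] else rest1
    (some rest2, r.2.1, r.2.2, r.2.1 ++ r.2.2)


-- ===== PRECONDITION & SPEC =====
def Spec_extract_lineage_columns (columns : Option (List String)) (out : Option (List String) × List String × List String × List String) : Prop := out = extract_lineage_columns_alt columns
instance (columns : Option (List String)) (out : Option (List String) × List String × List String × List String) : Decidable (Spec_extract_lineage_columns columns out) := by unfold Spec_extract_lineage_columns; infer_instance

-- ===== CLAIM (what is proved, stated in full; the proofs are below) =====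
def Claim_equal_extract_lineage_columns : Prop := ∀ (columns : Option (List String)), Dom_extract_lineage_columns columns → Spec_extract_lineage_columns columns (extract_lineage_columns columns)

-- ===== LEMMAS AND PROOFS =====
def pvTax (col : String) : Bool := PySem.Str.isIn "Taxonomic lineage (" col && !(col == "Taxonomic lineage (Ids)")
def pvIds (col : String) : Bool := PySem.Str.isIn "Taxonomic lineage IDs (" col

theorem pvFoldl (cols : List String) (r t i : List String) :
    cols.foldl pvStep (r, t, i) =
      (r ++ cols.filter (fun c => !pvTax c && !pvIds c),
       t ++ cols.filter pvTax, i ++ cols.filter pvIds) := by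
  induction cols generalizing r t i with
  | nil => simp
  | cons c cs ih =>
    simp only [List.foldl_cons, List.filter_cons]
    rw [show pvStep (r, t, i) c =
        ((if !pvTax c && !pvIds c then r ++ [c] else r),
         (if pvTax c then t ++ [c] else t),
         (if pvIds c then i ++ [c] else i)) from rfl, ih]
    cases h1 : pvTax c <;> cases h2 : pvIds c <;> simp

theorem pvContainsFilter (cols : List String) (p : String → Bool) (c : String) (hc : c ∈ cols) :
    (cols.filter p).contains c = p c := by
  cases h : p c
  · simp [List.mem_filter, h]
  · simp [List.mem_filter, h, hc]

theorem pvRestEq (cols : List String) :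
    cols.filter (fun c => !((cols.filter pvTax ++ cols.filter pvIds).contains c)) =
      cols.filter (fun c => !pvTax c && !pvIds c) := by
  apply List.filter_congr
  intro c hc
  simp only [List.contains_append, pvContainsFilter cols _ c hc]
  cases pvTax c <;> cases pvIds c <;> rfl



-- ===== VERDICT (by name: the statement is the Claim_ definition above) =====
theorem extract_lineage_columns_spec : Claim_equal_extract_lineage_columns := by
  intro columns _
  unfold Spec_extract_lineage_columns extract_lineage_columns extract_lineage_columns_alt
  cases columns with
  | none => rfl
  | some cols =>
    simp only [pvFoldl cols [] [] [], List.nil_append]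
    rw [show (fun col => PySem.Str.isIn "Taxonomic lineage (" col && !(col == "Taxonomic lineage (Ids)")) = pvTax from rfl,
        show (fun col => PySem.Str.isIn "Taxonomic lineage IDs (" col) = pvIds from rfl,
        pvRestEq cols]
    simp only [gt_iff_lt]
    have h : ∀ (l : List String), (!l.isEmpty) = decide (0 < l.length) := by
      intro l; cases l <;> rfl
    simp only [h, decide_eq_true_eq]
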